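-- pv_equiv track=rewrite | github.com/gluesolutions/glue-vispy-viewers | glue_vispy_viewers/scatter/multi_scatter.py | get_connection_mask
-- ===== SOURCE A (Python) =====
-- from itertools import groupby
--
-- def get_connection_mask(a):
--     """
--     Given a subset mask, return the appropriate
--     vispy.Line connection array for the subset.
--     Only the points in the subset are plotted, so
--     return an array where each group of connected
--     points in the array is terminated by a FALSE
--     """
--     new_mask = []
--     for k,g in groupby(a):
--         if k:
--             for i in g:
--                 new_mask.extend([i])
--             new_mask[-1] = False #Last item in a connected group set to False
--         else:
--             pass
--     return new_mask
-- ===== SOURCE B (Python) =====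
-- def get_connection_mask(a):
--     """
--     Given a subset mask, return the appropriate
--     vispy.Line connection array for the subset.
--     Single streaming pass with one-element lookahead:
--     each element is decided by its successor (run continues ->
--     keep the value, run ends -> False); the final kept element
--     always ends a run.
--     """
--     it = iter(a)
--     try:
--         prev = next(it)
--     except StopIteration:
--         return []
--     out = []
--     for cur in it:
--         if prev:
--             out.append(prev if prev == cur else False)
--         prev = cur
--     if prev:
--         out.append(False)
--     return out
-- ===== Notes on version B (the rewrite author's own statement) =====
-- stated objective: alternative
-- what changed: Replaces groupby run-grouping plus in-place last-element rewrite with a single streaming pass using one-element lookahead that decides each element by its successor.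
import Mathlib
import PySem

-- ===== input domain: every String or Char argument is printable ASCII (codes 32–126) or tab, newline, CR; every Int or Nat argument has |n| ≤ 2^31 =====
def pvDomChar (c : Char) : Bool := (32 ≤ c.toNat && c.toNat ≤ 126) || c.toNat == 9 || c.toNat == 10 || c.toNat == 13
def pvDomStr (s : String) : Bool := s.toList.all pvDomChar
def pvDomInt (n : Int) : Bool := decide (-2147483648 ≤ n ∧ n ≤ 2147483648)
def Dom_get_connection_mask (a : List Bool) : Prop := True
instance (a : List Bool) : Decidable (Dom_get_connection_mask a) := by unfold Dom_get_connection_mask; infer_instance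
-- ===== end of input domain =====

-- B replaces A's groupby run-grouping + last-element rewrite by a single
-- streaming pass with one-element lookahead; same return value, same cost.

-- ===== PORT A =====
-- itertools.groupby: split into maximal runs of equal elements
def pvGroupby : List Bool → List (Bool × List Bool)
  | [] => []
  | x :: xs =>
    (x, x :: xs.takeWhile (· == x)) :: pvGroupby (xs.dropWhile (· == x))
  termination_by l => l.length
  decreasing_by
    simp only [List.length_cons]
    exact Nat.lt_succ_of_le (List.length_dropWhile_le _ _)

-- new_mask[-1] = False on a nonempty list (the group is always nonempty here)
def pvSetLastFalse (xs : List Bool) : List Bool := xs.dropLast ++ [false]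

-- the for-loop over the groups, accumulating new_mask
def pvProcGroups : List (Bool × List Bool) → List Bool → List Bool
  | [], acc => acc
  | (k, g) :: rest, acc =>
    if k then pvProcGroups rest (pvSetLastFalse (acc ++ g))
    else pvProcGroups rest acc

def get_connection_mask (a : List Bool) : List Bool :=
  pvProcGroups (pvGroupby a) []

-- ===== PORT B =====
-- the for-loop over the buffered iterator, with `prev` as lookbehind state
def pvGo (prev : Bool) : List Bool → List Bool
  | [] => if prev then [false] else []
  | cur :: rest =>
    (if prev then [if prev == cur then prev else false] else []) ++ pvGo cur rest

def get_connection_mask_alt (a : List Bool) : List Bool :=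
  match a with
  | [] => []
  | h :: t => pvGo h t

-- ===== PRECONDITION & SPEC =====
def Spec_get_connection_mask (a : List Bool) (out : List Bool) : Prop := out = get_connection_mask_alt a
instance (a : List Bool) (out : List Bool) : Decidable (Spec_get_connection_mask a out) := by unfold Spec_get_connection_mask; infer_instance

-- ===== CLAIM (what is proved, stated in full; the proofs are below) =====
def Claim_equal_get_connection_mask : Prop := ∀ (a : List Bool), Dom_get_connection_mask a → Spec_get_connection_mask a (get_connection_mask a)

-- ===== LEMMAS AND PROOFS =====

-- reference function both ports are reduced to
def pvF : List Bool → List Bool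
  | [] => []
  | b :: xs =>
    if b then (match xs with | true :: _ => true | _ => false) :: pvF xs
    else pvF xs

theorem pvGo_eq_pvF (t : List Bool) : ∀ prev, pvGo prev t = pvF (prev :: t) := by
  induction t with
  | nil => intro prev; cases prev <;> simp [pvGo, pvF]
  | cons cur rest ih =>
    intro prev
    cases prev <;> cases cur <;> simp [pvGo, pvF, ih]

theorem alt_eq_pvF (a : List Bool) : get_connection_mask_alt a = pvF a := by
  cases a with
  | nil => rfl
  | cons h t => simpa [get_connection_mask_alt] using pvGo_eq_pvF t h

theorem pvF_dropWhile_false (xs : List Bool) :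
    pvF (xs.dropWhile (· == false)) = pvF xs := by
  induction xs with
  | nil => rfl
  | cons b t ih =>
    cases b with
    | false => exact ih
    | true => rfl

theorem pvF_true_run (xs : List Bool) :
    pvF (true :: xs) =
      List.replicate (xs.takeWhile (· == true)).length true
        ++ false :: pvF (xs.dropWhile (· == true)) := by
  induction xs with
  | nil => simp [pvF]
  | cons b t ih =>
    cases b with
    | true =>
      simp [List.takeWhile, List.dropWhile, pvF] at ih ⊢
      rw [List.replicate_succ]
      simpa [pvF] using ih
    | false => simp [List.takeWhile, List.dropWhile, pvF]

theorem takeWhile_true_replicate (xs : List Bool) :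
    xs.takeWhile (· == true) = List.replicate (xs.takeWhile (· == true)).length true := by
  induction xs with
  | nil => rfl
  | cons b t ih =>
    cases b with
    | false => rfl
    | true =>
      rw [show List.takeWhile (· == true) (true :: t) = true :: List.takeWhile (· == true) t
            from rfl,
          List.length_cons, List.replicate_succ]
      exact congrArg (true :: ·) ih

theorem proc_eq (n : ℕ) : ∀ (a : List Bool), a.length ≤ n →
    ∀ acc, pvProcGroups (pvGroupby a) acc = acc ++ pvF a := by
  induction n with
  | zero =>
    intro a ha acc
    have : a = [] := List.eq_nil_of_length_eq_zero (Nat.le_zero.mp ha)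
    subst this; simp [pvGroupby, pvProcGroups, pvF]
  | succ n ih =>
    intro a ha acc
    cases a with
    | nil => simp [pvGroupby, pvProcGroups, pvF]
    | cons b t =>
      have hlen : (t.dropWhile (· == b)).length ≤ n := by
        have := List.length_dropWhile_le (· == b) t
        simp [List.length_cons] at ha
        omega
      cases b with
      | false =>
        rw [pvGroupby]
        simp only [pvProcGroups]
        rw [if_neg (by simp), ih _ hlen acc, pvF_dropWhile_false]
        rfl
      | true =>
        rw [pvGroupby]
        simp only [pvProcGroups]
        rw [if_pos (by simp), ih _ hlen, pvF_true_run]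
        have hne : (true :: t.takeWhile (· == true)) ≠ ([] : List Bool) := by simp
        have hrep : (true :: t.takeWhile (· == true)).dropLast
            = List.replicate (t.takeWhile (· == true)).length true := by
          conv_lhs => rw [takeWhile_true_replicate t]
          rw [show (true :: List.replicate (t.takeWhile (· == true)).length true)
                = List.replicate (t.takeWhile (· == true)).length true ++ [true] from by
              rw [← List.replicate_succ, List.replicate_succ'],
            List.dropLast_concat]
        rw [pvSetLastFalse, List.dropLast_append_of_ne_nil hne, hrep,
          List.append_assoc, List.append_assoc]
        rfl

-- ===== VERDICT (by name: the statement is the Claim_ definition above) =====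
theorem get_connection_mask_spec : Claim_equal_get_connection_mask := by
  intro a _
  unfold Spec_get_connection_mask
  rw [alt_eq_pvF, get_connection_mask, proc_eq a.length a (le_refl _) []]
  rfl
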